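-- pv_equiv track=rewrite | github.com/andrewshvv/findr | src/common/telegram.py | _replace_newlines
-- ===== SOURCE A (Python) =====
-- def _replace_newlines(string):
--     string = string.replace('?\n', ' . ')
--     string = string.replace('!\n', ' . ')
--     string = string.replace(')\n', ' . ')
--     string = string.replace(';\n', ' . ')
--     string = string.replace('.\n', ' . ')
--     for k in range(10, 0, -1):
--         string = string.replace('\n' * k, '. ')
--
--     return string
-- ===== SOURCE B (Python) =====
-- def _replace_newlines(string):
--     # pass 1: one scan replacing punctuation+newline pairs with ' . '
--     out = []
--     i = 0
--     n = len(string)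
--     while i < n:
--         c = string[i]
--         if c in '?!);.' and i + 1 < n and string[i + 1] == '\n':
--             out.append(' . ')
--             i += 2
--         else:
--             out.append(c)
--             i += 1
--     s = ''.join(out)
--     # pass 2: one scan collapsing each maximal newline run of length L into ceil(L/10) copies of '. '
--     res = []
--     i = 0
--     n = len(s)
--     while i < n:
--         if s[i] == '\n':
--             j = i
--             while j < n and s[j] == '\n':
--                 j += 1
--             res.append('. ' * ((j - i + 9) // 10))
--             i = j
--         else:
--             res.append(s[i])
--             i += 1
--     return ''.join(res)
-- ===== Notes on version B (the rewrite author's own statement) =====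
-- stated objective: alternative
-- what changed: Replaces A's five sequential global str.replace passes plus the ten-iteration largest-first newline-run replace loop with two single left-to-right scans: one scan rewriting punctuation+newline pairs, and one scan collapsing each maximal newline run of length L into ceil(L/10) copies of the two-char dot replacement via a closed-form ceiling.
import Mathlib
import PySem

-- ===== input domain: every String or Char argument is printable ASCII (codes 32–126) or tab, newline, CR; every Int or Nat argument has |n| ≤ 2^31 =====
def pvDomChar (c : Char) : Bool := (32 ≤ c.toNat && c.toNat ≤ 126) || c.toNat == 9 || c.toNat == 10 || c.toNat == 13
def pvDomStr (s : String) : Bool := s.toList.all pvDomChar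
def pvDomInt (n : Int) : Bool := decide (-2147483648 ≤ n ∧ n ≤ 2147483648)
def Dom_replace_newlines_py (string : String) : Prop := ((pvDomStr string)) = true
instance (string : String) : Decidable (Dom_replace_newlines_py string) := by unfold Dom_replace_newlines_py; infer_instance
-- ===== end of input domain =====

-- B replaces A's five global `.replace` passes plus the ten-iteration newline-run replace
-- loop by two single left-to-right scans (punct+newline pairs first, then each maximal
-- newline run collapsed via a closed-form ceiling); alternative decomposition, not timed faster.


-- ===== PORT A =====
-- literal transliteration of A: five sequential replaces, then
-- `for k in range(10, 0, -1): string = string.replace('\n' * k, '. ')`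
def replace_newlines_py (string : String) : String :=
  let s1 := PySem.Str.replace string "?\n" " . "
  let s2 := PySem.Str.replace s1 "!\n" " . "
  let s3 := PySem.Str.replace s2 ")\n" " . "
  let s4 := PySem.Str.replace s3 ";\n" " . "
  let s5 := PySem.Str.replace s4 ".\n" " . "
  (PySem.List.pyRange 10 0 (-1)).foldl
    (fun s k => PySem.Str.replace s (String.ofList (List.replicate k.toNat '\n')) ". ") s5


-- ===== PORT B =====
-- `c in '?!);.'` of Source B (one char against that 5-char string)
def pvIsPunct (c : Char) : Bool := c == '?' || c == '!' || c == ')' || c == ';' || c == '.'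

-- pass 1 of Source B: one scan; punct followed by a newline emits the 3-char replacement, skipping both
def pvScanS (S : Char → Bool) : List Char → List Char
  | [] => []
  | c :: t =>
    if S c = true ∧ t.head? = some '\n' then ' ' :: '.' :: ' ' :: pvScanS S t.tail
    else c :: pvScanS S t
  termination_by u => u.length
  decreasing_by
  · simpa using Nat.lt_succ_of_le (Nat.sub_le _ _)
  · exact Nat.lt_succ_self _

-- the n-fold dot-space repetition of Source B as a char list
def pvDots : Nat → List Char
  | 0 => []
  | n + 1 => '.' :: ' ' :: pvDots n

-- pass 2 of Source B: one scan; each maximal run of L newlines becomes (L + 9) // 10 dot-space pairs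
def pvCollapse : List Char → List Char
  | [] => []
  | c :: t =>
    if c = '\n' then
      pvDots ((1 + (t.takeWhile (· == '\n')).length + 9) / 10) ++ pvCollapse (t.dropWhile (· == '\n'))
    else c :: pvCollapse t
  termination_by u => u.length
  decreasing_by
  · simpa using Nat.lt_succ_of_le (List.length_dropWhile_le _ _)
  · exact Nat.lt_succ_self _

def replace_newlines_py_alt (string : String) : String :=
  String.ofList (pvCollapse (pvScanS pvIsPunct string.toList))

-- ===== PRECONDITION & SPEC =====
def Spec_replace_newlines_py (string : String) (out : String) : Prop := out = replace_newlines_py_alt string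
instance (string : String) (out : String) : Decidable (Spec_replace_newlines_py string out) := by unfold Spec_replace_newlines_py; infer_instance

-- ===== CLAIM (what is proved, stated in full; the proofs are below) =====
def Claim_equal_replace_newlines_py : Prop := ∀ (string : String), Dom_replace_newlines_py string → Spec_replace_newlines_py string (replace_newlines_py string)

-- ===== LEMMAS AND PROOFS =====

def pvRepl (old new : List Char) : List Char → List Char
  | [] => []
  | c :: t =>
    if old.isPrefixOf (c :: t) then new ++ pvRepl old new (t.drop (old.length - 1))
    else c :: pvRepl old new t
  termination_by u => u.length
  decreasing_by
  · simpa using Nat.lt_succ_of_le (List.length_drop_le _ _)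
  · exact Nat.lt_succ_self _

lemma pvRepl_go (old new : List Char) (hold : old ≠ []) :
    ∀ (fuel : Nat) (l acc : List Char), l.length ≤ fuel →
      PySem.Chars.replace.go old new fuel l acc = acc.reverse ++ pvRepl old new l := by
  intro fuel
  induction fuel with
  | zero =>
    intro l acc hl
    have : l = [] := List.length_eq_zero_iff.mp (Nat.le_zero.mp hl)
    subst this
    simp [PySem.Chars.replace.go, pvRepl]
  | succ fuel ih =>
    intro l acc hl
    cases l with
    | nil =>
      rw [PySem.Chars.replace.go.eq_def]
      simp [pvRepl]
    | cons c t =>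
      simp only [List.length_cons] at hl
      by_cases hp : old.isPrefixOf (c :: t)
      · rw [PySem.Chars.replace.go]
        simp only [hp, if_true]
        have hlen : (List.drop old.length (c :: t)).length ≤ fuel := by
          have h1 : 1 ≤ old.length := List.length_pos_iff.mpr hold
          simp only [List.length_drop, List.length_cons]
          omega
        rw [ih _ _ hlen]
        have hdrop : List.drop old.length (c :: t) = t.drop (old.length - 1) := by
          have h1 : 1 ≤ old.length := List.length_pos_iff.mpr hold
          obtain ⟨m, hm⟩ := Nat.exists_eq_add_of_le h1
          rw [hm, Nat.add_comm 1 m]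
          simp [List.drop_succ_cons]
        rw [hdrop, pvRepl]
        simp [hp]
      · rw [PySem.Chars.replace.go]
        simp only [hp, if_false]
        rw [ih t (c :: acc) (by omega)]
        rw [pvRepl]
        simp [hp]

lemma replace_eq_pvRepl (s old new : List Char) (h : old ≠ []) :
    PySem.Chars.replace s old new = pvRepl old new s := by
  rw [PySem.Chars.replace]
  simp only [List.isEmpty_iff, h, if_neg, ite_false]
  · exact pvRepl_go old new h s.length s [] (le_refl _)

-- pattern of k newlines is no prefix of a shorter run followed by a non-newline
lemma not_prefix_run (k : Nat) : ∀ (j : Nat) (w : List Char), j < k → w.head? ≠ some '\n' →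
    (List.replicate k '\n').isPrefixOf (List.replicate j '\n' ++ w) = false := by
  intro j
  induction j generalizing k with
  | zero =>
    intro w hj hw
    have hk1 : 1 ≤ k := by omega
    obtain ⟨k', rfl⟩ := Nat.exists_eq_add_of_le hk1
    cases w with
    | nil => simp [List.replicate_succ, List.isPrefixOf]
    | cons d w' =>
      simp only [List.head?_cons, ne_eq, Option.some.injEq] at hw
      simp [Nat.add_comm 1 k', List.replicate_succ, List.isPrefixOf, hw]
      intro h
      exact absurd h.symm hw
  | succ j ih =>
    intro w hj hw
    have hk1 : 1 ≤ k := by omega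
    obtain ⟨k', rfl⟩ := Nat.exists_eq_add_of_le hk1
    rw [Nat.add_comm 1 k', List.replicate_succ, List.replicate_succ]
    simp only [List.cons_append, List.isPrefixOf, BEq.rfl, Bool.true_and]
    exact ih k' w (by omega) hw

-- pass a newline-free block through pvRepl with a newline pattern
lemma pvRepl_pass_no_nl (k : Nat) (hk : 1 ≤ k) (d : List Char) :
    ∀ (v w : List Char), (∀ c ∈ v, c ≠ '\n') →
      pvRepl (List.replicate k '\n') d (v ++ w) = v ++ pvRepl (List.replicate k '\n') d w := by
  intro v
  induction v with
  | nil => simp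
  | cons c v' ih =>
    intro w hv
    have hc : c ≠ '\n' := hv c (by simp)
    obtain ⟨k', rfl⟩ := Nat.exists_eq_add_of_le hk
    rw [List.cons_append, pvRepl]
    rw [if_neg ?hnp]
    case hnp =>
      rw [Nat.add_comm 1 k', List.replicate_succ]
      simp [List.isPrefixOf, Ne.symm hc]
    rw [ih w (fun c hc' => hv c (by simp [hc']))]
    simp

-- pass a too-short newline run through pvRepl with a longer newline pattern
lemma pvRepl_pass_run (k : Nat) (d : List Char) :
    ∀ (j : Nat) (w : List Char), j < k → w.head? ≠ some '\n' →
      pvRepl (List.replicate k '\n') d (List.replicate j '\n' ++ w)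
        = List.replicate j '\n' ++ pvRepl (List.replicate k '\n') d w := by
  intro j
  induction j with
  | zero => intro w _ _; simp
  | succ j ih =>
    intro w hj hw
    rw [List.replicate_succ, List.cons_append, pvRepl,
        if_neg (by
          intro hp
          have hb := not_prefix_run k (j+1) w hj hw
          rw [List.replicate_succ, List.cons_append] at hb
          rw [hp] at hb
          exact Bool.true_eq_false.mp hb)]
    rw [ih w (by omega) hw]
    simp

lemma takeWhile_run (m : Nat) (rest : List Char) (hrest : rest.head? ≠ some '\n') :
    (List.replicate m '\n' ++ rest).takeWhile (· == '\n') = List.replicate m '\n' := by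
  induction m with
  | zero =>
    cases rest with
    | nil => simp
    | cons c t =>
      simp only [List.head?_cons, ne_eq, Option.some.injEq] at hrest
      simp [List.takeWhile_cons, hrest]
  | succ m ih => simp [List.replicate_succ, List.takeWhile_cons, ih]

lemma dropWhile_run (m : Nat) (rest : List Char) (hrest : rest.head? ≠ some '\n') :
    (List.replicate m '\n' ++ rest).dropWhile (· == '\n') = rest := by
  induction m with
  | zero =>
    cases rest with
    | nil => simp
    | cons c t =>
      simp only [List.head?_cons, ne_eq, Option.some.injEq] at hrest
      simp [List.dropWhile_cons, hrest]
  | succ m ih => simp [List.replicate_succ, List.dropWhile_cons, ih]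

-- run decomposition of a list starting with '\n'
lemma run_decomp (t : List Char) :
    '\n' :: t = List.replicate (1 + (t.takeWhile (· == '\n')).length) '\n'
                  ++ t.dropWhile (· == '\n') := by
  have htw : t.takeWhile (· == '\n') = List.replicate (t.takeWhile (· == '\n')).length '\n' := by
    apply List.eq_replicate_of_mem
    intro b hb
    have := List.mem_takeWhile_imp hb
    simpa using this
  calc '\n' :: t = '\n' :: (t.takeWhile (· == '\n') ++ t.dropWhile (· == '\n')) := by
        rw [List.takeWhile_append_dropWhile]
    _ = '\n' :: (List.replicate (t.takeWhile (· == '\n')).length '\n' ++ t.dropWhile (· == '\n')) := by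
        conv_lhs => rw [htw]
    _ = List.replicate (1 + (t.takeWhile (· == '\n')).length) '\n' ++ t.dropWhile (· == '\n') := by
        rw [Nat.add_comm 1, List.replicate_succ, List.cons_append]

lemma head?_dropWhile_ne (t : List Char) :
    (t.dropWhile (· == '\n')).head? ≠ some '\n' := by
  intro h
  have := List.head?_dropWhile_not (· == '\n') t
  rw [h] at this
  simp at this





def pvRuns (k : Nat) : List Char → List Char
  | [] => []
  | c :: t =>
    if c = '\n' then
      pvDots ((1 + (t.takeWhile (· == '\n')).length) / 10) ++
        (if (1 + (t.takeWhile (· == '\n')).length) % 10 > k then ['.', ' ']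
         else List.replicate ((1 + (t.takeWhile (· == '\n')).length) % 10) '\n') ++
        pvRuns k (t.dropWhile (· == '\n'))
    else c :: pvRuns k t
  termination_by u => u.length
  decreasing_by
  · simpa using Nat.lt_succ_of_le (List.length_dropWhile_le _ _)
  · exact Nat.lt_succ_self _

lemma pvDots_mem_ne_nl (n : Nat) : ∀ c ∈ pvDots n, c ≠ '\n' := by
  induction n with
  | zero => simp [pvDots]
  | succ n ih =>
    intro c hc
    rw [pvDots] at hc
    simp only [List.mem_cons] at hc
    rcases hc with rfl | rfl | h
    · simp
    · simp
    · exact ih c h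

lemma pvDots_append (a b : Nat) : pvDots a ++ pvDots b = pvDots (a + b) := by
  induction a with
  | zero => simp [pvDots]
  | succ a ih => rw [pvDots, Nat.succ_add, pvDots]; simp [ih]

-- closed form of pvRuns on a leading newline run
lemma runs_closed (k m : Nat) (rest : List Char) (hrest : rest.head? ≠ some '\n') :
    pvRuns k (List.replicate m '\n' ++ rest)
      = pvDots (m / 10) ++
          (if m % 10 > k then ['.', ' '] else List.replicate (m % 10) '\n') ++
          pvRuns k rest := by
  cases m with
  | zero => simp [pvDots]
  | succ m =>
    rw [List.replicate_succ, List.cons_append, pvRuns, if_pos rfl,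
        takeWhile_run m rest hrest, dropWhile_run m rest hrest]
    simp [List.length_replicate, Nat.add_comm 1 m]

lemma collapse_closed (m : Nat) (rest : List Char) (hrest : rest.head? ≠ some '\n') :
    pvCollapse (List.replicate m '\n' ++ rest)
      = pvDots ((m + 9) / 10) ++ pvCollapse rest := by
  cases m with
  | zero => norm_num [pvDots]
  | succ m =>
    rw [List.replicate_succ, List.cons_append, pvCollapse, if_pos rfl,
        takeWhile_run m rest hrest, dropWhile_run m rest hrest]
    simp [List.length_replicate, Nat.add_comm 1 m]

lemma head?_pvRuns (k : Nat) (t : List Char) (h : t.head? ≠ some '\n') :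
    (pvRuns k t).head? ≠ some '\n' := by
  cases t with
  | nil => simp [pvRuns]
  | cons c t' =>
    simp only [List.head?_cons, ne_eq, Option.some.injEq] at h
    rw [pvRuns, if_neg h]
    simpa using h

lemma head?_pvScanS (S : Char → Bool) (t : List Char) (h : t.head? ≠ some '\n') :
    (pvScanS S t).head? ≠ some '\n' := by
  cases t with
  | nil => simp [pvScanS]
  | cons c t' =>
    simp only [List.head?_cons, ne_eq, Option.some.injEq] at h
    rw [pvScanS]
    split
    · simp
    · simpa using h

lemma pvDots_one : pvDots 1 = ['.', ' '] := rfl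

lemma pvRepl_match (k : Nat) (hk : 1 ≤ k) (d X : List Char) :
    pvRepl (List.replicate k '\n') d (List.replicate k '\n' ++ X)
      = d ++ pvRepl (List.replicate k '\n') d X := by
  obtain ⟨k', rfl⟩ := Nat.exists_eq_add_of_le hk
  have hrep : List.replicate (1 + k') '\n' = '\n' :: List.replicate k' '\n' := by
    rw [Nat.add_comm, List.replicate_succ]
  conv_lhs => rw [show List.replicate (1 + k') '\n' ++ X = '\n' :: (List.replicate k' '\n' ++ X) by
    rw [hrep, List.cons_append]]
  rw [pvRepl, if_pos (List.isPrefixOf_iff_prefix.mpr (by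
    rw [← List.cons_append, ← hrep]; exact List.prefix_append _ _))]
  congr 2
  rw [List.length_replicate]
  have : 1 + k' - 1 = k' := by omega
  rw [this, List.drop_append_of_le_length (by simp)]
  simp

lemma replTen_eq_aux : ∀ (n : Nat) (u : List Char), u.length ≤ n →
    pvRepl (List.replicate 10 '\n') ['.', ' '] u = pvRuns 9 u := by
  intro n
  induction n with
  | zero =>
    intro u hu
    have : u = [] := List.length_eq_zero_iff.mp (Nat.le_zero.mp hu)
    subst this
    simp [pvRepl, pvRuns]
  | succ n ih =>
    intro u hu
    cases u with
    | nil => simp [pvRepl, pvRuns]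
    | cons c t =>
      simp only [List.length_cons] at hu
      by_cases hc : c = '\n'
      · subst hc
        have hrest := head?_dropWhile_ne t
        have hlrest : (t.dropWhile (· == '\n')).length ≤ t.length := List.length_dropWhile_le _ _
        have hltw : (t.takeWhile (· == '\n')).length + (t.dropWhile (· == '\n')).length = t.length := by
          have h0 := congrArg List.length (List.takeWhile_append_dropWhile (p := (· == '\n')) (l := t))
          rw [List.length_append] at h0
          exact h0
        rw [run_decomp t]
        set m := 1 + (t.takeWhile (· == '\n')).length with hm
        set rest := t.dropWhile (· == '\n') with hr
        by_cases h10 : 10 ≤ m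
        · obtain ⟨m', hm'⟩ := Nat.exists_eq_add_of_le h10
          conv_lhs => rw [hm', List.replicate_add, List.append_assoc]
          rw [pvRepl_match 10 (by omega)]
          rw [ih (List.replicate m' '\n' ++ rest) (by simp only [List.length_append, List.length_replicate]; omega)]
          rw [runs_closed 9 m' rest hrest]
          conv_rhs => rw [hm']
          rw [runs_closed 9 (10 + m') rest hrest]
          rw [if_neg (by omega), if_neg (by omega)]
          have h1 : (10 + m') % 10 = m' % 10 := by omega
          have h2 : (10 + m') / 10 = m' / 10 + 1 := by omega
          rw [h1, h2]
          simp only [← List.append_assoc]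
          rw [show (['.', ' '] : List Char) ++ pvDots (m' / 10) = pvDots (m' / 10 + 1) by
            rw [← pvDots_one, pvDots_append, Nat.add_comm]]
        · rw [pvRepl_pass_run 10 ['.', ' '] m rest (by omega) hrest]
          rw [ih rest (by omega)]
          rw [runs_closed 9 m rest hrest, if_neg (by omega)]
          rw [Nat.div_eq_of_lt (by omega), Nat.mod_eq_of_lt (by omega)]
          simp [pvDots]
      · rw [pvRepl, if_neg (by
          intro hp
          have h' := List.isPrefixOf_iff_prefix.mp hp
          have h10 : List.replicate 10 '\n' = '\n' :: List.replicate 9 '\n' := rfl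
          rw [h10] at h'
          exact hc (List.cons_prefix_cons.mp h').1.symm)]
        rw [pvRuns, if_neg hc]
        rw [ih t (by omega)]

lemma replK_eq_aux (k : Nat) (hk1 : 1 ≤ k) (hk9 : k ≤ 9) :
    ∀ (n : Nat) (u : List Char), u.length ≤ n →
      pvRepl (List.replicate k '\n') ['.', ' '] (pvRuns k u) = pvRuns (k - 1) u := by
  intro n
  induction n with
  | zero =>
    intro u hu
    have : u = [] := List.length_eq_zero_iff.mp (Nat.le_zero.mp hu)
    subst this
    simp [pvRepl, pvRuns]
  | succ n ih =>
    intro u hu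
    cases u with
    | nil => simp [pvRepl, pvRuns]
    | cons c t =>
      simp only [List.length_cons] at hu
      by_cases hc : c = '\n'
      · subst hc
        have hrest := head?_dropWhile_ne t
        have hlrest : (t.dropWhile (· == '\n')).length ≤ t.length := List.length_dropWhile_le _ _
        rw [run_decomp t]
        set m := 1 + (t.takeWhile (· == '\n')).length with hm
        set rest := t.dropWhile (· == '\n') with hr
        rw [runs_closed k m rest hrest, runs_closed (k - 1) m rest hrest]
        by_cases hgt : m % 10 > k
        · rw [if_pos hgt, if_pos (by omega)]
          rw [pvRepl_pass_no_nl k hk1 ['.', ' '] (pvDots (m / 10) ++ ['.', ' '])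
                (pvRuns k rest)
                (by
                  intro c hcmem
                  rcases List.mem_append.mp hcmem with h | h
                  · exact pvDots_mem_ne_nl _ c h
                  · simp only [List.mem_cons, List.not_mem_nil] at h
                    rcases h with rfl | rfl | h
                    · simp
                    · simp
                    · exact absurd h (by simp))]
          rw [ih rest (by omega)]
        · rw [if_neg hgt]
          by_cases heq : m % 10 = k
          · rw [if_pos (by omega)]
            rw [List.append_assoc]
            rw [pvRepl_pass_no_nl k hk1 ['.', ' '] (pvDots (m / 10)) _
                  (pvDots_mem_ne_nl _)]
            rw [heq, pvRepl_match k hk1]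
            rw [ih rest (by omega)]
            simp [List.append_assoc]
          · rw [if_neg (by omega)]
            rw [List.append_assoc]
            rw [pvRepl_pass_no_nl k hk1 ['.', ' '] (pvDots (m / 10)) _
                  (pvDots_mem_ne_nl _)]
            rw [pvRepl_pass_run k ['.', ' '] (m % 10) (pvRuns k rest) (by omega)
                  (head?_pvRuns k rest hrest)]
            rw [ih rest (by omega)]
            simp [List.append_assoc]
      · rw [pvRuns, if_neg hc, pvRuns, if_neg hc]
        rw [pvRepl, if_neg (by
          intro hp
          have h' := List.isPrefixOf_iff_prefix.mp hp
          obtain ⟨k', rfl⟩ := Nat.exists_eq_add_of_le hk1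
          rw [Nat.add_comm, List.replicate_succ] at h'
          exact hc (List.cons_prefix_cons.mp h').1.symm)]
        rw [ih t (by omega)]

lemma runs_zero_eq_collapse : ∀ (n : Nat) (u : List Char), u.length ≤ n →
    pvRuns 0 u = pvCollapse u := by
  intro n
  induction n with
  | zero =>
    intro u hu
    have : u = [] := List.length_eq_zero_iff.mp (Nat.le_zero.mp hu)
    subst this
    simp [pvRuns, pvCollapse]
  | succ n ih =>
    intro u hu
    cases u with
    | nil => simp [pvRuns, pvCollapse]
    | cons c t =>
      simp only [List.length_cons] at hu
      by_cases hc : c = '\n'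
      · subst hc
        have hrest := head?_dropWhile_ne t
        have hlrest : (t.dropWhile (· == '\n')).length ≤ t.length := List.length_dropWhile_le _ _
        rw [run_decomp t]
        set m := 1 + (t.takeWhile (· == '\n')).length with hm
        set rest := t.dropWhile (· == '\n') with hr
        rw [runs_closed 0 m rest hrest, collapse_closed m rest hrest]
        rw [ih rest (by omega)]
        by_cases hz : m % 10 = 0
        · rw [if_neg (by omega)]
          rw [hz, List.replicate_zero]
          have : (m + 9) / 10 = m / 10 := by omega
          rw [this]
          simp
        · rw [if_pos (by omega)]
          rw [← pvDots_one, pvDots_append]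
          have : m / 10 + 1 = (m + 9) / 10 := by omega
          rw [this]
      · rw [pvRuns, if_neg hc, pvCollapse, if_neg hc]
        rw [ih t (by omega)]

lemma scanS_false : ∀ (u : List Char), pvScanS (fun _ => false) u = u := by
  intro u
  induction u with
  | nil => simp [pvScanS]
  | cons c t ih =>
    rw [pvScanS, if_neg (by simp)]
    rw [ih]

lemma scan_step (S : Char → Bool) (x : Char) (hxsp : x ≠ ' ') (hxnl : x ≠ '\n')
    (hSx : S x = false) (hSnl : S '\n' = false) :
    ∀ (n : Nat) (u : List Char), u.length ≤ n →
      pvRepl [x, '\n'] [' ', '.', ' '] (pvScanS S u)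
        = pvScanS (fun c => S c || c == x) u := by
  intro n
  induction n with
  | zero =>
    intro u hu
    have : u = [] := List.length_eq_zero_iff.mp (Nat.le_zero.mp hu)
    subst this
    simp [pvScanS, pvRepl]
  | succ n ih =>
    intro u hu
    cases u with
    | nil => simp [pvScanS, pvRepl]
    | cons c t =>
      simp only [List.length_cons] at hu
      by_cases hmain : S c = true ∧ t.head? = some '\n'
      · -- S-match: both scans emit ' . '
        rw [pvScanS, if_pos hmain, pvScanS, if_pos (by
          exact ⟨by simp [hmain.1], hmain.2⟩)]
        -- pvRepl steps over ' ', '.', ' ' without matching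
        rw [pvRepl, if_neg (by
          intro hp
          exact hxsp (List.cons_prefix_cons.mp (List.isPrefixOf_iff_prefix.mp hp)).1)]
        rw [pvRepl, if_neg (by
          intro hp
          have h' := (List.cons_prefix_cons.mp (List.isPrefixOf_iff_prefix.mp hp)).2
          have h'' := (List.cons_prefix_cons.mp h').1
          exact absurd h''.symm (by decide))]
        rw [pvRepl, if_neg (by
          intro hp
          exact hxsp (List.cons_prefix_cons.mp (List.isPrefixOf_iff_prefix.mp hp)).1)]
        rw [ih t.tail (by cases t <;> simp_all <;> omega)]
      · rw [pvScanS, if_neg hmain]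
        by_cases hhd : t.head? = some '\n'
        · have hSc : S c = false := by
            rcases Bool.eq_false_or_eq_true (S c) with h | h
            · exact absurd ⟨h, hhd⟩ hmain
            · exact h
          by_cases hcx : c = x
          · -- c = x followed by '\n': pattern fires in pvRepl, S' fires in the scan
            subst hcx
            cases t with
            | nil => simp at hhd
            | cons d t' =>
              simp only [List.head?_cons, Option.some.injEq] at hhd
              subst hhd
              rw [pvScanS, if_neg (by simp [hSnl])]
              rw [pvRepl, if_pos (by
                apply List.isPrefixOf_iff_prefix.mpr
                exact List.cons_prefix_cons.mpr ⟨rfl, List.cons_prefix_cons.mpr ⟨rfl, List.nil_prefix⟩⟩)]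
              rw [pvScanS, if_pos ⟨by simp, by simp⟩]
              simp only [List.length_cons, List.length_nil, Nat.add_sub_cancel, List.drop_succ_cons,
                List.drop_zero, List.tail_cons]
              rw [ih t' (by simp only [List.length_cons] at hu; omega)]
              simp
          · -- c ≠ x: no match at c
            rw [pvRepl, if_neg (by
              intro hp
              exact hcx (List.cons_prefix_cons.mp (List.isPrefixOf_iff_prefix.mp hp)).1.symm)]
            rw [pvScanS, if_neg (by
              intro hcon
              rcases hcon with ⟨h1, _⟩
              simp only [hSc, Bool.false_or, beq_iff_eq] at h1
              exact hcx h1)]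
            rw [ih t (by omega)]
        · -- next char is not '\n': neither side can fire
          rw [pvRepl, if_neg (by
            intro hp
            have h' := List.isPrefixOf_iff_prefix.mp hp
            have h1 := (List.cons_prefix_cons.mp h').1
            have h2 := (List.cons_prefix_cons.mp h').2
            -- second pattern char '\n' must be the head of pvScanS S t
            have hhd' := head?_pvScanS S t hhd
            cases hsc : pvScanS S t with
            | nil => rw [hsc] at h2; simp at h2
            | cons e r =>
              rw [hsc] at h2
              have := (List.cons_prefix_cons.mp h2).1
              rw [hsc] at hhd'
              simp only [List.head?_cons, ne_eq, Option.some.injEq] at hhd'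
              exact hhd' this.symm)]
          rw [pvScanS, if_neg (by
            intro hcon
            exact hhd hcon.2)]
          rw [ih t (by omega)]

lemma punct_chain (l : List Char) :
    pvRepl ['.', '\n'] [' ', '.', ' ']
      (pvRepl [';', '\n'] [' ', '.', ' ']
        (pvRepl [')', '\n'] [' ', '.', ' ']
          (pvRepl ['!', '\n'] [' ', '.', ' ']
            (pvRepl ['?', '\n'] [' ', '.', ' '] l)))) = pvScanS pvIsPunct l := by
  have h1 := scan_step (fun _ => false) '?' (by decide) (by decide) rfl rfl l.length l le_rfl
  rw [scanS_false l] at h1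
  have h2 := scan_step (fun c => (fun _ : Char => false) c || c == '?') '!'
      (by decide) (by decide) (by decide) (by decide) l.length l le_rfl
  have h3 := scan_step (fun c => (fun c : Char => (fun _ : Char => false) c || c == '?') c || c == '!') ')'
      (by decide) (by decide) (by decide) (by decide) l.length l le_rfl
  have h4 := scan_step (fun c => (fun c : Char => (fun c : Char => (fun _ : Char => false) c || c == '?') c || c == '!') c || c == ')') ';'
      (by decide) (by decide) (by decide) (by decide) l.length l le_rfl
  have h5 := scan_step (fun c => (fun c : Char => (fun c : Char => (fun c : Char => (fun _ : Char => false) c || c == '?') c || c == '!') c || c == ')') c || c == ';') '.'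
      (by decide) (by decide) (by decide) (by decide) l.length l le_rfl
  rw [h1, h2, h3, h4, h5]
  have hfun : (fun c : Char => (fun c : Char => (fun c : Char => (fun c : Char => (fun c : Char => (fun _ : Char => false) c || c == '?') c || c == '!') c || c == ')') c || c == ';') c || c == '.') = pvIsPunct := by
    funext c
    simp [pvIsPunct, Bool.or_assoc]
  rw [hfun]

lemma run_chain (u : List Char) :
    pvRepl (List.replicate 1 '\n') ['.', ' '] (pvRepl (List.replicate 2 '\n') ['.', ' '] (pvRepl (List.replicate 3 '\n') ['.', ' '] (pvRepl (List.replicate 4 '\n') ['.', ' '] (pvRepl (List.replicate 5 '\n') ['.', ' '] (pvRepl (List.replicate 6 '\n') ['.', ' '] (pvRepl (List.replicate 7 '\n') ['.', ' '] (pvRepl (List.replicate 8 '\n') ['.', ' '] (pvRepl (List.replicate 9 '\n') ['.', ' '] (pvRepl (List.replicate 10 '\n') ['.', ' '] (u))))))))))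
      = pvCollapse u := by
  rw [replTen_eq_aux u.length u le_rfl]
  rw [replK_eq_aux 9 (by decide) (by decide) u.length u le_rfl]
  rw [show (9 - 1 : Nat) = 8 from rfl]
  rw [replK_eq_aux 8 (by decide) (by decide) u.length u le_rfl]
  rw [show (8 - 1 : Nat) = 7 from rfl]
  rw [replK_eq_aux 7 (by decide) (by decide) u.length u le_rfl]
  rw [show (7 - 1 : Nat) = 6 from rfl]
  rw [replK_eq_aux 6 (by decide) (by decide) u.length u le_rfl]
  rw [show (6 - 1 : Nat) = 5 from rfl]
  rw [replK_eq_aux 5 (by decide) (by decide) u.length u le_rfl]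
  rw [show (5 - 1 : Nat) = 4 from rfl]
  rw [replK_eq_aux 4 (by decide) (by decide) u.length u le_rfl]
  rw [show (4 - 1 : Nat) = 3 from rfl]
  rw [replK_eq_aux 3 (by decide) (by decide) u.length u le_rfl]
  rw [show (3 - 1 : Nat) = 2 from rfl]
  rw [replK_eq_aux 2 (by decide) (by decide) u.length u le_rfl]
  rw [show (2 - 1 : Nat) = 1 from rfl]
  rw [replK_eq_aux 1 (by decide) (by decide) u.length u le_rfl]
  rw [show (1 - 1 : Nat) = 0 from rfl]
  exact runs_zero_eq_collapse u.length u le_rfl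

lemma pvMain (s : String) : replace_newlines_py s = replace_newlines_py_alt s := by
  unfold replace_newlines_py replace_newlines_py_alt
  rw [show PySem.List.pyRange 10 0 (-1) = [10, 9, 8, 7, 6, 5, 4, 3, 2, 1] from by decide]
  simp only [List.foldl_cons, List.foldl_nil]
  have hinj : ∀ a b : String, a.toList = b.toList → a = b := by
    intro a b h
    calc a = String.ofList a.toList := by simp [String.ofList]
      _ = String.ofList b.toList := congrArg _ h
      _ = b := by simp [String.ofList]
  apply hinj
  simp only [PySem.Str.toList_replace]
  rw [show ("?\n".toList) = ['?', '\n'] from by decide,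
      show ("!\n".toList) = ['!', '\n'] from by decide,
      show (")\n".toList) = [')', '\n'] from by decide,
      show (";\n".toList) = [';', '\n'] from by decide,
      show (".\n".toList) = ['.', '\n'] from by decide,
      show (" . ".toList) = [' ', '.', ' '] from by decide,
      show (". ".toList) = ['.', ' '] from by decide]
  rw [show ((String.ofList (List.replicate (Int.toNat 10) '\n')).toList) = List.replicate 10 '\n' from by decide,
      show ((String.ofList (List.replicate (Int.toNat 9) '\n')).toList) = List.replicate 9 '\n' from by decide,
      show ((String.ofList (List.replicate (Int.toNat 8) '\n')).toList) = List.replicate 8 '\n' from by decide,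
      show ((String.ofList (List.replicate (Int.toNat 7) '\n')).toList) = List.replicate 7 '\n' from by decide,
      show ((String.ofList (List.replicate (Int.toNat 6) '\n')).toList) = List.replicate 6 '\n' from by decide,
      show ((String.ofList (List.replicate (Int.toNat 5) '\n')).toList) = List.replicate 5 '\n' from by decide,
      show ((String.ofList (List.replicate (Int.toNat 4) '\n')).toList) = List.replicate 4 '\n' from by decide,
      show ((String.ofList (List.replicate (Int.toNat 3) '\n')).toList) = List.replicate 3 '\n' from by decide,
      show ((String.ofList (List.replicate (Int.toNat 2) '\n')).toList) = List.replicate 2 '\n' from by decide,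
      show ((String.ofList (List.replicate (Int.toNat 1) '\n')).toList) = List.replicate 1 '\n' from by decide]
  simp only [replace_eq_pvRepl _ _ _ (show (['?', '\n'] : List Char) ≠ [] from by decide),
      replace_eq_pvRepl _ _ _ (show (['!', '\n'] : List Char) ≠ [] from by decide),
      replace_eq_pvRepl _ _ _ (show ([')', '\n'] : List Char) ≠ [] from by decide),
      replace_eq_pvRepl _ _ _ (show ([';', '\n'] : List Char) ≠ [] from by decide),
      replace_eq_pvRepl _ _ _ (show (['.', '\n'] : List Char) ≠ [] from by decide),
      replace_eq_pvRepl _ _ _ (show (List.replicate 10 '\n') ≠ [] from by decide),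
      replace_eq_pvRepl _ _ _ (show (List.replicate 9 '\n') ≠ [] from by decide),
      replace_eq_pvRepl _ _ _ (show (List.replicate 8 '\n') ≠ [] from by decide),
      replace_eq_pvRepl _ _ _ (show (List.replicate 7 '\n') ≠ [] from by decide),
      replace_eq_pvRepl _ _ _ (show (List.replicate 6 '\n') ≠ [] from by decide),
      replace_eq_pvRepl _ _ _ (show (List.replicate 5 '\n') ≠ [] from by decide),
      replace_eq_pvRepl _ _ _ (show (List.replicate 4 '\n') ≠ [] from by decide),
      replace_eq_pvRepl _ _ _ (show (List.replicate 3 '\n') ≠ [] from by decide),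
      replace_eq_pvRepl _ _ _ (show (List.replicate 2 '\n') ≠ [] from by decide),
      replace_eq_pvRepl _ _ _ (show (List.replicate 1 '\n') ≠ [] from by decide)]
  rw [punct_chain s.toList]
  rw [show (String.ofList (pvCollapse (pvScanS pvIsPunct s.toList))).toList
        = pvCollapse (pvScanS pvIsPunct s.toList) from String.toList_ofList]
  exact run_chain (pvScanS pvIsPunct s.toList)

-- ===== VERDICT (by name: the statement is the Claim_ definition above) =====
theorem replace_newlines_py_spec : Claim_equal_replace_newlines_py := by
  intro s _
  unfold Spec_replace_newlines_py
  exact pvMain s
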